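/-
  A WHOLE IMAGE AS ONE NUMBER: the file's bytes as a little-endian `Nat` literal, the byte array it spells, and the step from
  "the array's bytes are in memory" to "this slice of the number is in memory" (`CodeNat` of UserX/Code.lean) and to the value of
  a little-endian load.

      #image_nat name "hex" "hex" …        `def name : Nat` (the bytes the strings spell, in order, as ONE little-endian number: a
                                           raw literal, built directly, NOT compiled) and `def name.size : Nat` (their count). The strings are the lines of
                                           `xxd -p -c 32 FILE`: the generated file can be compared with the image by eye / `diff`.
      User.imageOfNat N size               the byte array: `size` bytes, byte `i` is bits `8 i … 8 i + 7` of `N`. Never evaluated: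
                                           the proofs go through `imageOfNat_size` and `imageOfNat_getElem`.
      User.CodeAt.ofImageNat               `CodeAt mem base (imageOfNat N size).toList` ⊢ `CodeNat mem base N size`
      User.CodeNat.slice                   `CodeNat mem base N len`, `(N >>> (8 * off)) % 2 ^ (8 * n) = M` ⊢
                                           `CodeNat mem (base + off) M n`: the hypothesis compares two closed numbers — ONE
                                           big-number operation of the kernel, whatever the offset
      User.CodeNat.readLE                  `CodeNat mem a M n` ⊢ `mem.readLE a n = M % 256 ^ n`

  WHY A NUMBER: see UserX/Code.lean. Measured on the 137,536-byte image of stb_vorbis: a `List UInt8` literal with its `CodeList` fact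
  (`#code_bytes` on the whole file) elaborates in 36 s with a peak of 23 GB of memory; `def n : Nat := 0x…` (275,000 digits) in 36 s
  (the parser is quadratic); `#image_nat` in 0.4 s and 60 MB over the imports, and every fact about a slice is one `Nat` equation.
  KERNEL HYGIENE: the kernel knows no `irreducible`; never let it compare `imageOfNat N size` with a term that only reduces to it
  (it may unfold the `Array.ofFn`): prove facts for a variable array and instantiate (see Vorbis/Spec/FinalImage.lean).
-/
import UserX.Code
open Lean Meta Elab Command

namespace X86
namespace User

/-! ### The byte array of a number -/

/-- **The byte array a number spells**: `size` bytes, little-endian. -/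
def imageOfNat (N size : Nat) : Array UInt8 :=
  Array.ofFn (n := size) fun i => UInt8.ofNat (N >>> (8 * i.val))

/-- It has `size` bytes. -/
theorem imageOfNat_size (N size : Nat) : (imageOfNat N size).size = size := by
  unfold imageOfNat
  rw [Array.size_ofFn]

/-- Byte `i` of the array is byte `i` of the number. -/
theorem imageOfNat_getElem (N size i : Nat) (h : i < (imageOfNat N size).size) :
    (imageOfNat N size)[i] = UInt8.ofNat (N >>> (8 * i)) := by
  unfold imageOfNat
  rw [Array.getElem_ofFn]

/-- The same, of the array's list. -/
theorem imageOfNat_toList_getElem (N size i : Nat) (h : i < (imageOfNat N size).toList.length) :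
    (imageOfNat N size).toList[i] = UInt8.ofNat (N >>> (8 * i)) := by
  have hi : i < (imageOfNat N size).size := by
    rw [Array.length_toList] at h
    exact h
  rw [Array.getElem_toList]
  exact imageOfNat_getElem N size i hi

/-- **The array in memory is its number in memory.** -/
theorem CodeAt.ofImageNat {mem : Mem} {base : Word} {N size : Nat}
    (h : CodeAt mem base (imageOfNat N size).toList) : CodeNat mem base N size := by
  intro i hi
  have hlen : i < (imageOfNat N size).toList.length := by
    rw [Array.length_toList, imageOfNat_size]
    exact hi
  rw [h i hlen, imageOfNat_toList_getElem N size i hlen, UInt8.toNat_ofNat']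

/-! ### Slices of a number in memory -/

/-- **A slice of a number in memory**: `hM` compares two closed numbers. -/
theorem CodeNat.slice {mem : Mem} {base : Word} {N len : Nat} (h : CodeNat mem base N len) (off n M : Nat)
    (hlen : off + n ≤ len) (hM : (N >>> (8 * off)) % 2 ^ (8 * n) = M) :
    CodeNat mem (base + UInt64.ofNat off) M n := by
  intro j hj
  have hmem := h (off + j) (by omega)
  have hbyte := field_byte N off n j hj
  rw [hM] at hbyte
  rw [add_ofNat_add, hmem, hbyte]

/-- The number with its first byte dropped is in memory one byte further. -/
theorem CodeNat.tail {mem : Mem} {a : Word} {M n : Nat} (h : CodeNat mem a M (n + 1)) :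
    CodeNat mem (a + 1) (M >>> 8) n := by
  intro i hi
  have hmem := h (i + 1) (by omega)
  have hshift : 8 * (i + 1) = 8 + 8 * i := by omega
  rw [Mem.add_ofNat_succ, hmem, hshift, Nat.shiftRight_add]

/-- **A little-endian load of a number in memory.** -/
theorem CodeNat.readLE {mem : Mem} {a : Word} {M n : Nat} (h : CodeNat mem a M n) :
    mem.readLE a n = M % 256 ^ n := by
  induction n generalizing a M with
  | zero => simp [Mem.readLE, Nat.mod_one]
  | succ n ih =>
    have h0 := h 0 (Nat.succ_pos n)
    simp only [UInt64.reduceOfNat, UInt64.add_zero, Nat.mul_zero, Nat.shiftRight_zero] at h0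
    simp only [Mem.readLE]
    rw [h0, ih h.tail, Nat.shiftRight_eq_div_pow]
    have e8 : 2 ^ 8 = 256 := rfl
    rw [e8, Nat.pow_succ, Nat.mul_comm (256 ^ n) 256, Nat.mod_mul]

/-! ### The command -/

/-- The little-endian number of the bytes `lo … hi - 1` of an array, by halving: linear-logarithmic in big-number work
(`leNatOfBytes` folds byte by byte: quadratic). -/
partial def leNatOfByteArray (bytes : ByteArray) (lo hi : Nat) : Nat :=
  if hi ≤ lo then
    0
  else if hi - lo ≤ 8 then
    (List.range (hi - lo)).foldr (fun i acc => (bytes.get! (lo + i)).toNat + 256 * acc) 0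
  else
    let mid := lo + (hi - lo) / 2
    leNatOfByteArray bytes lo mid + (leNatOfByteArray bytes mid hi) <<< (8 * (mid - lo))

/-- `#image_nat name "hex" "hex" …`: `def name : Nat` (the bytes the strings spell, in order, as one little-endian number) and
`def name.size : Nat` (how many bytes). Like `#code_bytes`, the definitions are for the kernel and are NOT compiled (the C text of
a 137 KB literal alone costs `lake build` 31 s): a definition that uses them is `noncomputable`. -/
elab "#image_nat " name:ident strings:str* : command => do
  let mut bytes : ByteArray := ByteArray.empty
  for s in strings do
    for b in (← bytesOfSyntax s) do
      bytes := bytes.push b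
  let declName := (← getCurrNamespace) ++ name.getId
  let natType := mkConst ``Nat
  liftCoreM <| addDecl <| .defnDecl
    { name := declName, levelParams := [], type := natType, value := mkRawNatLit (leNatOfByteArray bytes 0 bytes.size)
      hints := .regular 0, safety := .safe }
  liftCoreM <| addDecl <| .defnDecl
    { name := declName.str "size", levelParams := [], type := natType, value := mkRawNatLit bytes.size
      hints := .regular 0, safety := .safe }

end User
end X86
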